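-- pv_equiv track=rewrite | github.com/ColorfulPockets/the_gang | 7-card-hand-simulation.py | get_longest_straight_flush
-- ===== SOURCE A (Python) =====
-- from collections import Counter, defaultdict
--
-- def get_longest_consecutive(ranks):
--     unique = set(ranks)
--
--     # Ace high handling
--     if 1 in unique:
--         unique.add(14)
--
--     sorted_ranks = sorted(unique)
--
--     longest = 1
--     current = 1
--
--     for i in range(1, len(sorted_ranks)):
--         if sorted_ranks[i] == sorted_ranks[i - 1] + 1:
--             current += 1
--             longest = max(longest, current)
--         else:
--             current = 1
--
--     return longest
--
-- def get_longest_straight_flush(hand):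
--     suit_groups = defaultdict(list)
--     for r, s in hand:
--         suit_groups[s].append(r)
--
--     longest = 0
--     for ranks in suit_groups.values():
--         if len(ranks) >= 3:
--             longest = max(longest, get_longest_consecutive(ranks))
--
--     return longest
-- ===== SOURCE B (Python) =====
-- def _longest_run(ranks):
--     s = set(ranks)
--     if 1 in s:
--         s.add(14)
--     best = 1
--     for r in s:
--         if r - 1 not in s:            # r starts a run
--             length = 1
--             while r + length in s:    # walk the run forward
--                 length += 1
--             best = max(best, length)
--     return best
--
-- def get_longest_straight_flush(hand):
--     suit_groups = {}
--     for r, s in hand: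
--         suit_groups.setdefault(s, []).append(r)
--
--     longest = 0
--     for ranks in suit_groups.values():
--         if len(ranks) >= 3:
--             longest = max(longest, _longest_run(ranks))
--
--     return longest
-- ===== Notes on version B (the rewrite author's own statement) =====
-- stated objective: idiomatic
-- what changed: Replaces the sort-then-adjacent-scan longest-consecutive computation with the classic set-based run detection: for each rank whose predecessor is absent, walk forward through successors counting the run length.
import Mathlib
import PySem

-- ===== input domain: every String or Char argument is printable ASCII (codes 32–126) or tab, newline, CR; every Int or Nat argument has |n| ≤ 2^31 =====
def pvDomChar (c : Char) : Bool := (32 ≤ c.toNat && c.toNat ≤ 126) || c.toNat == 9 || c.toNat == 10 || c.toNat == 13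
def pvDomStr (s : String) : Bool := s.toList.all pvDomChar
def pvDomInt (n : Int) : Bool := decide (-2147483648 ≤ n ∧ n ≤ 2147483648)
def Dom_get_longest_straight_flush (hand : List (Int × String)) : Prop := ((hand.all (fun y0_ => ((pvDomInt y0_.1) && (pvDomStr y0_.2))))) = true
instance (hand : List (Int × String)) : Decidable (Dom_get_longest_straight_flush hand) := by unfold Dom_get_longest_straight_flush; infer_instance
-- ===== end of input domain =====

-- B replaces the sort-then-adjacent-scan longest-consecutive computation with the
-- set-based run detection (walk forward from each run start); objective: idiomatic.

-- ===== PORT A =====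
-- the 'for i in range(1, len(sorted_ranks))' adjacency scan, carrying the previous
-- element instead of the index i (same state longest/current, same branch order)
def pvScanA : Int → Int → Int → List Int → Int
  | _, longest, _, [] => longest
  | prev, longest, current, x :: xs =>
    if x = prev + 1 then pvScanA x (max longest (current + 1)) (current + 1) xs
    else pvScanA x longest 1 xs

def pvLongestConsecutive (ranks : List Int) : Int :=
  let unique : PySem.Set Int := PySem.Set.ofList ranks
  let unique := if (1 : Int) ∈ unique then PySem.Set.add unique 14 else unique
  match PySem.List.sorted unique (fun x => x) false with
  | [] => 1
  | t :: ts => pvScanA t 1 1 ts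

def pvGroupA (hand : List (Int × String)) : PySem.Dict String (List Int) :=
  hand.foldl (fun d p => d.modify p.2 [] (fun l => l ++ [p.1])) PySem.Dict.empty

def get_longest_straight_flush (hand : List (Int × String)) : Int :=
  (pvGroupA hand).values.foldl
    (fun longest ranks => if 3 ≤ ranks.length then max longest (pvLongestConsecutive ranks) else longest) 0

-- ===== PORT B =====
-- the 'while r + length in s: length += 1' walk; fuel s.length suffices because the
-- run r, r+1, … consists of distinct members of s
def pvWalk (s : List Int) : Nat → Int → Int → Int
  | 0, _, len => len
  | fuel + 1, r, len => if (r + len) ∈ s then pvWalk s fuel r (len + 1) else len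

def pvLongestRun (ranks : List Int) : Int :=
  let s : PySem.Set Int := PySem.Set.ofList ranks
  let s := if (1 : Int) ∈ s then PySem.Set.add s 14 else s
  s.foldl (fun best r => if (r - 1) ∈ s then best else max best (pvWalk s s.length r 1)) 1

-- 'suit_groups.setdefault(s, []).append(r)': fetch the list (or []), append, store back
-- (Dict.insert overwrites in place, like the mutation of the stored list)
def pvGroupB (hand : List (Int × String)) : PySem.Dict String (List Int) :=
  hand.foldl (fun d p => d.insert p.2 (d.getD p.2 [] ++ [p.1])) PySem.Dict.empty

def get_longest_straight_flush_alt (hand : List (Int × String)) : Int :=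
  (pvGroupB hand).values.foldl
    (fun longest ranks => if 3 ≤ ranks.length then max longest (pvLongestRun ranks) else longest) 0

-- ===== PRECONDITION & SPEC =====
def Spec_get_longest_straight_flush (hand : List (Int × String)) (out : Int) : Prop := out = get_longest_straight_flush_alt hand
instance (hand : List (Int × String)) (out : Int) : Decidable (Spec_get_longest_straight_flush hand out) := by unfold Spec_get_longest_straight_flush; infer_instance

-- ===== CLAIM (what is proved, stated in full; the proofs are below) =====
def Claim_equal_get_longest_straight_flush : Prop := ∀ (hand : List (Int × String)), Dom_get_longest_straight_flush hand → Spec_get_longest_straight_flush hand (get_longest_straight_flush hand)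

-- ===== LEMMAS AND PROOFS =====

-- B's fold step, abstracted over the membership list and the fuel
def pvStep (s : List Int) (n : Nat) : Int → Int → Int :=
  fun best r => if (r - 1) ∈ s then best else max best (pvWalk s n r 1)

-- the block-maximum function both sides are reduced to
def pvBest : Int → Int → List Int → Int
  | _, c, [] => c
  | prev, c, x :: xs => if x = prev + 1 then pvBest x (c + 1) xs else max c (pvBest x 1 xs)

-- the consecutive block [a, a+1, …, a+n-1]
def pvBlock (a : Int) : Nat → List Int
  | 0 => []
  | n + 1 => a :: pvBlock (a + 1) n

-- split off the leading consecutive block after t: returns (its length, the rest)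
def pvSplit : Int → List Int → Nat × List Int
  | _, [] => (0, [])
  | t, x :: xs => if x = t + 1 then ((pvSplit x xs).1 + 1, (pvSplit x xs).2) else (0, x :: xs)

lemma pvBest_ge : ∀ (ts : List Int) (prev c : Int), c ≤ pvBest prev c ts := by
  intro ts
  induction ts with
  | nil => intro prev c; simp [pvBest]
  | cons x xs ih =>
    intro prev c
    simp only [pvBest]
    split
    · exact le_trans (by omega) (ih x (c + 1))
    · exact le_max_left _ _

lemma pvScanA_eq_best : ∀ (ts : List Int) (prev L c : Int), 1 ≤ c → c ≤ L →
    pvScanA prev L c ts = max L (pvBest prev c ts) := by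
  intro ts
  induction ts with
  | nil => intro prev L c h1 h2; simp only [pvScanA, pvBest]; omega
  | cons x xs ih =>
    intro prev L c h1 h2
    simp only [pvScanA, pvBest]
    split
    · rw [ih x (max L (c + 1)) (c + 1) (by omega) (le_max_right _ _)]
      have hb := pvBest_ge xs x (c + 1)
      omega
    · rw [ih x L 1 le_rfl (by omega)]
      omega

lemma pvBlock_length : ∀ (n : Nat) (a : Int), (pvBlock a n).length = n := by
  intro n
  induction n with
  | zero => intro a; rfl
  | succ n ih => intro a; simp [pvBlock, ih]

lemma mem_pvBlock : ∀ (n : Nat) (a x : Int), x ∈ pvBlock a n ↔ ∃ i : Nat, i < n ∧ x = a + (i : Int) := by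
  intro n
  induction n with
  | zero => intro a x; simp [pvBlock]
  | succ n ih =>
    intro a x
    simp only [pvBlock, List.mem_cons, ih (a + 1) x]
    constructor
    · rintro (rfl | ⟨i, hi, rfl⟩)
      · exact ⟨0, by omega, by simp⟩
      · exact ⟨i + 1, by omega, by push_cast; ring⟩
    · rintro ⟨i, hi, rfl⟩
      match i with
      | 0 => left; simp
      | j + 1 => right; exact ⟨j, by omega, by push_cast; ring⟩

lemma pvSplit_spec : ∀ (ts : List Int) (t : Int), (t :: ts).Pairwise (· < ·) →
    ts = pvBlock (t + 1) (pvSplit t ts).1 ++ (pvSplit t ts).2 ∧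
    (∀ x ∈ (pvSplit t ts).2, t + (pvSplit t ts).1 + 2 ≤ x) ∧
    (pvSplit t ts).2.Pairwise (· < ·) := by
  intro ts
  induction ts with
  | nil => intro t _; simp [pvSplit, pvBlock]
  | cons x xs ih =>
    intro t hp
    rw [List.pairwise_cons] at hp
    obtain ⟨hhead, htail⟩ := hp
    simp only [pvSplit]
    split
    · rename_i hx
      obtain ⟨h1, h2, h3⟩ := ih x htail
      subst hx
      refine ⟨?_, ?_, h3⟩
      · simp only [pvBlock]
        conv_lhs => rw [h1]
        simp
      · intro y hy
        have := h2 y hy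
        push_cast at this ⊢
        omega
    · rename_i hx
      have hxt : t < x := hhead x (by simp)
      refine ⟨by simp [pvBlock], ?_, htail⟩
      intro y hy
      rcases List.mem_cons.mp hy with rfl | hy'
      · push_cast; omega
      · have h1 : x < y := (List.pairwise_cons.mp htail).1 y hy'
        push_cast
        omega

lemma pvBest_split : ∀ (ts : List Int) (t c : Int),
    pvBest t c ts = (match (pvSplit t ts).2 with
      | [] => c + ((pvSplit t ts).1 : Int)
      | r :: rs => max (c + ((pvSplit t ts).1 : Int)) (pvBest r 1 rs)) := by
  intro ts
  induction ts with
  | nil => intro t c; simp [pvBest, pvSplit]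
  | cons x xs ih =>
    intro t c
    simp only [pvBest, pvSplit]
    split
    · rw [ih x (c + 1)]
      have e : c + 1 + ((pvSplit x xs).1 : Int) = c + (((pvSplit x xs).1 : Int) + 1) := by ring
      rcases hR : (pvSplit x xs).2 with _ | ⟨r, rs⟩ <;> simp only [hR] <;> push_cast <;> rw [e]
    · simp

lemma pvWalk_spec : ∀ (m : Nat) (s : List Int) (fuel : Nat), m ≤ fuel → ∀ (r l : Int),
    (∀ i : Nat, i < m → (r + l + (i : Int)) ∈ s) → (r + l + (m : Int)) ∉ s →
    pvWalk s fuel r l = l + m := by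
  intro m
  induction m with
  | zero =>
    intro s fuel _ r l _ hout
    have h0 : r + l ∉ s := by simpa using hout
    cases fuel with
    | zero => simp [pvWalk]
    | succ f => simp [pvWalk, h0]
  | succ m ih =>
    intro s fuel hle r l hin hout
    cases fuel with
    | zero => omega
    | succ f =>
      have h0 : r + l ∈ s := by simpa using hin 0 (by omega)
      simp only [pvWalk, if_pos h0]
      have e1 : pvWalk s f r (l + 1) = (l + 1) + (m : Int) := by
        apply ih s f (by omega) r (l + 1)
        · intro i hi
          have := hin (i + 1) (by omega)
          have e : r + (l + 1) + (i : Int) = r + l + ((i + 1 : Nat) : Int) := by push_cast; ring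
          rw [e]; exact this
        · have e : r + (l + 1) + (m : Int) = r + l + ((m + 1 : Nat) : Int) := by push_cast; ring
          rw [e]; exact hout
      rw [e1]; push_cast; ring

lemma pvExists_stop (s : List Int) (r l : Int) : ∃ m : Nat, m ≤ s.length ∧
    (∀ i : Nat, i < m → (r + l + (i : Int)) ∈ s) ∧ (r + l + (m : Int)) ∉ s := by
  have pigeon : ¬ (∀ i : Nat, i ≤ s.length → (r + l + (i : Int)) ∈ s) := by
    intro hall
    have hsub : ((List.range (s.length + 1)).map (fun i : Nat => r + l + (i : Int))) ⊆ s := by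
      intro y hy
      simp only [List.mem_map, List.mem_range] at hy
      obtain ⟨i, hi, rfl⟩ := hy
      exact hall i (by omega)
    have hnd2 : ((List.range (s.length + 1)).map (fun i : Nat => r + l + (i : Int))).Nodup := by
      refine List.Nodup.map ?_ List.nodup_range
      intro i j h
      simp only [add_right_inj, Nat.cast_inj] at h
      exact h
    have hlen := (List.subperm_of_subset hnd2 hsub).length_le
    simp at hlen
  have key : ∃ m : Nat, (r + l + (m : Int)) ∉ s := by
    by_contra hall
    push_neg at hall
    exact pigeon (fun i _ => hall i)
  refine ⟨Nat.find key, ?_, ?_, Nat.find_spec key⟩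
  · by_contra hgt
    push_neg at hgt
    apply pigeon
    intro i hi
    have := Nat.find_min key (show i < Nat.find key by omega)
    simpa using this
  · intro i hi
    have := Nat.find_min key hi
    simpa using this

lemma pvStep_ge (s : List Int) (n : Nat) : ∀ (L : List Int) (a : Int), a ≤ L.foldl (pvStep s n) a := by
  intro L
  induction L with
  | nil => intro a; simp
  | cons x L ih =>
    intro a
    refine le_trans ?_ (ih (pvStep s n a x))
    simp only [pvStep]
    split <;> omega

lemma pvStep_shift (s : List Int) (n : Nat) : ∀ (L : List Int) (a : Int), 1 ≤ a →
    L.foldl (pvStep s n) a = max a (L.foldl (pvStep s n) 1) := by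
  intro L
  induction L with
  | nil => intro a ha; simp; omega
  | cons x L ih =>
    intro a ha
    have hge := pvStep_ge s n L 1
    simp only [List.foldl_cons]
    by_cases hc : (x - 1) ∈ s
    · have e1 : pvStep s n a x = a := by simp [pvStep, hc]
      have e2 : pvStep s n 1 x = 1 := by simp [pvStep, hc]
      rw [e1, e2, ih a ha]
    · have e1 : pvStep s n a x = max a (pvWalk s n x 1) := by simp [pvStep, hc]
      have e2 : pvStep s n 1 x = max 1 (pvWalk s n x 1) := by simp [pvStep, hc]
      rw [e1, e2, ih (max a (pvWalk s n x 1)) (by omega), ih (max 1 (pvWalk s n x 1)) (by omega)]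
      omega

lemma pvStep_skip (s : List Int) (n : Nat) : ∀ (L : List Int) (a : Int),
    (∀ r ∈ L, (r - 1) ∈ s) → L.foldl (pvStep s n) a = a := by
  intro L
  induction L with
  | nil => intro a _; rfl
  | cons x L ih =>
    intro a h
    have e1 : pvStep s n a x = a := by simp [pvStep, h x (by simp)]
    simp only [List.foldl_cons, e1]
    exact ih a (fun r hr => h r (by simp [hr]))

lemma pvWalk_congr {s t : List Int} (h : ∀ y, y ∈ s ↔ y ∈ t) :
    ∀ (fuel : Nat) (r l : Int), pvWalk s fuel r l = pvWalk t fuel r l := by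
  intro fuel
  induction fuel with
  | zero => intro r l; rfl
  | succ f ih =>
    intro r l
    simp only [pvWalk]
    by_cases hm : r + l ∈ s
    · rw [if_pos hm, if_pos ((h _).1 hm), ih]
    · rw [if_neg hm, if_neg (fun c => hm ((h _).2 c))]

-- core: on a strictly increasing list, B's fold computes the block maximum
lemma pvCore : ∀ (fuelN : Nat) (t : Int) (ts : List Int), (t :: ts).length ≤ fuelN →
    (t :: ts).Pairwise (· < ·) →
    (t :: ts).foldl (pvStep (t :: ts) (t :: ts).length) 1 = pvBest t 1 ts := by
  intro fuelN
  induction fuelN with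
  | zero => intro t ts h _; simp at h
  | succ N ih =>
    intro t ts hlen hp
    obtain ⟨m, R, hsplit⟩ : ∃ m R, pvSplit t ts = (m, R) := ⟨_, _, rfl⟩
    have hspec := pvSplit_spec ts t hp
    rw [hsplit] at hspec
    simp only at hspec
    obtain ⟨hts, hR, hRp⟩ := hspec
    have hblock : t :: ts = pvBlock t (m + 1) ++ R := by
      conv_lhs => rw [hts]
      simp [pvBlock]
    have hmemT : ∀ x : Int, x ∈ t :: ts ↔ ((∃ i : Nat, i < m + 1 ∧ x = t + (i : Int)) ∨ x ∈ R) := by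
      intro x
      rw [hblock, List.mem_append, mem_pvBlock]
    have hlenT : (t :: ts).length = (m + 1) + R.length := by
      rw [hblock, List.length_append, pvBlock_length]
    have htm1 : t - 1 ∉ t :: ts := by
      rw [hmemT]
      rintro (⟨i, hi, he⟩ | hmem)
      · omega
      · have := hR _ hmem; omega
    have htop : t + 1 + (m : Int) ∉ t :: ts := by
      rw [hmemT]
      rintro (⟨i, hi, he⟩ | hmem)
      · omega
      · have := hR _ hmem; omega
    have hwt : pvWalk (t :: ts) (t :: ts).length t 1 = 1 + (m : Int) := by
      apply pvWalk_spec m _ _ (by omega) t 1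
      · intro i hi
        rw [hmemT]
        exact Or.inl ⟨i + 1, by omega, by push_cast; ring⟩
      · exact htop
    have hstep_t : pvStep (t :: ts) (t :: ts).length 1 t = 1 + (m : Int) := by
      simp only [pvStep, if_neg htm1, hwt]
      omega
    have hskip : (pvBlock (t + 1) m).foldl (pvStep (t :: ts) (t :: ts).length) (1 + (m : Int)) = 1 + (m : Int) := by
      apply pvStep_skip
      intro r hrm
      rw [mem_pvBlock] at hrm
      obtain ⟨i, hi, rfl⟩ := hrm
      rw [hmemT]
      exact Or.inl ⟨i, by omega, by ring⟩
    have hcong : ∀ (acc : Int), ∀ x ∈ R, pvStep (t :: ts) (t :: ts).length acc x = pvStep R R.length acc x := by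
      intro acc x hx
      have hxge := hR x hx
      have hmem1 : (x - 1) ∈ t :: ts ↔ (x - 1) ∈ R := by
        rw [hmemT]
        constructor
        · rintro (⟨i, hi, he⟩ | h)
          · omega
          · exact h
        · exact fun h => Or.inr h
      simp only [pvStep]
      by_cases hc : (x - 1) ∈ R
      · rw [if_pos (hmem1.mpr hc), if_pos hc]
      · rw [if_neg (fun c => hc (hmem1.mp c)), if_neg hc]
        obtain ⟨m', hm'le, hm'in, hm'out⟩ := pvExists_stop R x 1
        have hw1 : pvWalk R R.length x 1 = 1 + (m' : Int) :=
          pvWalk_spec m' R R.length hm'le x 1 hm'in hm'out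
        have hw2 : pvWalk (t :: ts) (t :: ts).length x 1 = 1 + (m' : Int) := by
          apply pvWalk_spec m' _ _ (by omega) x 1
          · intro i hi
            rw [hmemT]
            exact Or.inr (hm'in i hi)
          · rw [hmemT]
            rintro (⟨i, hi, he⟩ | hmm)
            · omega
            · exact hm'out hmm
        rw [hw1, hw2]
    have hbest := pvBest_split ts t 1
    rw [hsplit] at hbest
    simp only at hbest
    rw [List.foldl_cons, hstep_t]
    have e2 : ts.foldl (pvStep (t :: ts) (t :: ts).length) (1 + (m : Int))
        = (pvBlock (t + 1) m ++ R).foldl (pvStep (t :: ts) (t :: ts).length) (1 + (m : Int)) := by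
      rw [← hts]
    rw [e2, List.foldl_append, hskip, pvStep_shift _ _ _ _ (by omega),
        PySem.List.foldl_congr_mem R _ _ 1 hcong]
    rcases R with _ | ⟨r, rs⟩
    · simp only [List.foldl_nil]
      simp only at hbest
      rw [hbest]
      exact max_eq_left (le_add_of_nonneg_right (Int.natCast_nonneg m))
    · have hlen' : (r :: rs).length ≤ N := by omega
      rw [ih r rs hlen' hRp]
      simp only at hbest
      rw [hbest]

lemma pvInner_core (S : List Int) (hnd : S.Nodup) :
    (match PySem.List.sorted S (fun x => x) false with
      | [] => (1 : Int)
      | t :: ts => pvScanA t 1 1 ts)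
    = S.foldl (pvStep S S.length) 1 := by
  have hperm : (PySem.List.sorted S (fun x => x) false).Perm S :=
    PySem.List.sorted_perm S (fun x => x) false
  have hndT : (PySem.List.sorted S (fun x => x) false).Nodup := hperm.symm.nodup hnd
  have hle : (PySem.List.sorted S (fun x => x) false).Pairwise (· ≤ ·) :=
    PySem.List.sorted_pairwise (xs := S) (key := fun x => x)
  have hlt : (PySem.List.sorted S (fun x => x) false).Pairwise (· < ·) :=
    (hle.and hndT).imp (fun h => lt_of_le_of_ne h.1 h.2)
  have hfold : S.foldl (pvStep S S.length) 1
      = (PySem.List.sorted S (fun x => x) false).foldl (pvStep S S.length) 1 := by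
    refine hperm.symm.foldl_eq' ?_ 1
    intro x _ y _ z
    simp only [pvStep]
    split_ifs <;> omega
  have hcong : ∀ (acc : Int), ∀ x ∈ PySem.List.sorted S (fun x => x) false,
      pvStep S S.length acc x
        = pvStep (PySem.List.sorted S (fun x => x) false)
            (PySem.List.sorted S (fun x => x) false).length acc x := by
    intro acc x _
    simp only [pvStep]
    by_cases hc : (x - 1) ∈ S
    · rw [if_pos hc, if_pos (hperm.mem_iff.mpr hc)]
    · rw [if_neg hc, if_neg (fun c => hc (hperm.mem_iff.mp c))]
      congr 1
      rw [hperm.length_eq]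
      exact pvWalk_congr (fun y => (hperm.mem_iff (a := y)).symm) _ x 1
  rw [hfold, PySem.List.foldl_congr_mem _ _ _ 1 hcong]
  rcases hT : PySem.List.sorted S (fun x => x) false with _ | ⟨t, ts⟩
  · rfl
  · rw [hT] at hlt
    simp only
    rw [pvScanA_eq_best ts t 1 1 le_rfl le_rfl, pvCore (t :: ts).length t ts le_rfl hlt]
    have := pvBest_ge ts t 1
    omega

lemma pvInner (ranks : List Int) : pvLongestConsecutive ranks = pvLongestRun ranks := by
  have hnd : (if (1 : Int) ∈ PySem.Set.ofList ranks
      then PySem.Set.add (PySem.Set.ofList ranks) 14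
      else PySem.Set.ofList ranks).Nodup := by
    split
    · exact PySem.Set.nodup_add _ _ (PySem.Set.nodup_ofList ranks)
    · exact PySem.Set.nodup_ofList ranks
  simpa only [pvLongestConsecutive, pvLongestRun, pvStep] using pvInner_core _ hnd

-- ===== VERDICT (by name: the statement is the Claim_ definition above) =====
theorem get_longest_straight_flush_spec : Claim_equal_get_longest_straight_flush := by
  intro hand _
  unfold Spec_get_longest_straight_flush
  unfold get_longest_straight_flush get_longest_straight_flush_alt
  have hg : pvGroupA hand = pvGroupB hand := rfl
  rw [hg]
  refine PySem.List.foldl_congr_mem _ _ _ _ ?_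
  intro acc x _
  rw [pvInner]
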